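-- pv_equiv track=rewrite | github.com/Elyseum/AdventOfCode2020 | day11.py | create_adjacent_coo_sight
-- ===== SOURCE A (Python) =====
-- def create_adjacent_coo_sight(grid):
--   coordinates = []
--   x_range = range(0, len(grid))
--   y_range = range(0, len(grid[0]))
--   for x in x_range:
--     for y in y_range:
--       adjacent = []
--       adjacent.append(get_coo_in_sight(x_range, y_range, x, -1, y, -1))
--       adjacent.append(get_coo_in_sight(x_range, y_range, x, -1, y, +0))
--       adjacent.append(get_coo_in_sight(x_range, y_range, x, -1, y, +1))
--       adjacent.append(get_coo_in_sight(x_range, y_range, x, +0, y, -1))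
--       adjacent.append(get_coo_in_sight(x_range, y_range, x, +0, y, +1))
--       adjacent.append(get_coo_in_sight(x_range, y_range, x, +1, y, -1))
--       adjacent.append(get_coo_in_sight(x_range, y_range, x, +1, y,  0))
--       adjacent.append(get_coo_in_sight(x_range, y_range, x, +1, y, +1))
--       coordinates.append((x, y, adjacent))
--   return coordinates
--
-- def get_coo_in_sight(x_range, y_range, x, x_offset, y, y_offset):
--   coordinates = []
--   x_coo = x + x_offset
--   y_coo = y + y_offset
--   while x_coo in x_range and y_coo in y_range:
--     coordinates.append((x_coo, y_coo))
--     x_coo += x_offset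
--     y_coo += y_offset
--   return coordinates
-- ===== SOURCE B (Python) =====
-- def _sight(n, m, x, y, dx, dy):
--     # closed-form number of in-bounds steps along (dx, dy) starting one step from (x, y)
--     if dx < 0:
--         kx = x
--     elif dx > 0:
--         kx = n - 1 - x
--     else:
--         kx = None
--     if dy < 0:
--         ky = y
--     elif dy > 0:
--         ky = m - 1 - y
--     else:
--         ky = None
--     if kx is None:
--         k = ky
--     elif ky is None:
--         k = kx
--     else:
--         k = min(kx, ky)
--     return [(x + i * dx, y + i * dy) for i in range(1, k + 1)]
--
--
-- def create_adjacent_coo_sight(grid):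
--     n, m = len(grid), len(grid[0])
--     dirs = [(-1, -1), (-1, 0), (-1, 1), (0, -1), (0, 1), (1, -1), (1, 0), (1, 1)]
--     return [(x, y, [_sight(n, m, x, y, dx, dy) for dx, dy in dirs])
--             for x in range(n) for y in range(m)]
-- ===== Notes on version B (the rewrite author's own statement) =====
-- stated objective: simpler
-- what changed: Replaces the step-by-step while-loop with an in-bounds membership test per direction by a closed-form step count (min of distances to the relevant borders) and a single range comprehension that emits each line-of-sight list directly.
import Mathlib
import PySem

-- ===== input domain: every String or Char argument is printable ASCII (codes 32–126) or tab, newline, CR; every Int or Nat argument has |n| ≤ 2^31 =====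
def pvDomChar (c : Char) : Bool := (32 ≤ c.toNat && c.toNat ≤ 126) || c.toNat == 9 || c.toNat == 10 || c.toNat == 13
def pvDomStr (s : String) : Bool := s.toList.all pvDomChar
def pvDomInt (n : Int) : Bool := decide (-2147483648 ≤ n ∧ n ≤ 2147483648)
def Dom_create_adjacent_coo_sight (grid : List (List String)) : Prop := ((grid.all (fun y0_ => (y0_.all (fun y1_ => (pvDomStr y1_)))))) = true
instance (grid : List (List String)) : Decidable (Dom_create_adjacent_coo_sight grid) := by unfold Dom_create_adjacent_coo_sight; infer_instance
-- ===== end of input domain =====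

-- B changes only the sight-line construction: a closed-form step count replaces A's while-loop
-- membership test; objective: simpler. Equivalence proved on nonempty grids (A raises on []).

-- ===== PORT A =====
-- while-loop of get_coo_in_sight; fuel is only a termination guard (n+m+1 steps always suffice)
def pvGcsLoop (fuel : Nat) (n m xc yc dx dy : Int) : List (Int × Int) :=
  match fuel with
  | 0 => []
  | f + 1 =>
    if 0 ≤ xc ∧ xc < n ∧ 0 ≤ yc ∧ yc < m then
      (xc, yc) :: pvGcsLoop f n m (xc + dx) (yc + dy) dx dy
    else []

def get_coo_in_sight (n m x dx y dy : Int) : List (Int × Int) :=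
  pvGcsLoop ((n + m).toNat + 1) n m (x + dx) (y + dy) dx dy

def create_adjacent_coo_sight (grid : List (List String)) : List (Int × Int × (List (List (Int × Int)))) :=
  let n : Int := grid.length
  let m : Int := (grid.headD []).length
  (PySem.List.pyRange 0 n 1).foldl (fun coordinates x =>
    (PySem.List.pyRange 0 m 1).foldl (fun coordinates y =>
      coordinates ++ [(x, y,
        [get_coo_in_sight n m x (-1) y (-1),
         get_coo_in_sight n m x (-1) y 0,
         get_coo_in_sight n m x (-1) y 1,
         get_coo_in_sight n m x 0 y (-1),
         get_coo_in_sight n m x 0 y 1,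
         get_coo_in_sight n m x 1 y (-1),
         get_coo_in_sight n m x 1 y 0,
         get_coo_in_sight n m x 1 y 1])]) coordinates) []

-- ===== PORT B =====
def pvSight (n m x y dx dy : Int) : List (Int × Int) :=
  let kx? : Option Int := if dx < 0 then some x else if dx > 0 then some (n - 1 - x) else none
  let ky? : Option Int := if dy < 0 then some y else if dy > 0 then some (m - 1 - y) else none
  let k : Int :=
    match kx?, ky? with
    | none, b? => b?.getD 0   -- Python's None/None case is unreachable for the 8 directions
    | some a, none => a
    | some a, some b => min a b
  (PySem.List.pyRange 1 (k + 1) 1).map (fun i => (x + i * dx, y + i * dy))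

def pvDirs : List (Int × Int) := [(-1, -1), (-1, 0), (-1, 1), (0, -1), (0, 1), (1, -1), (1, 0), (1, 1)]

def create_adjacent_coo_sight_alt (grid : List (List String)) : List (Int × Int × (List (List (Int × Int)))) :=
  let n : Int := grid.length
  let m : Int := (grid.headD []).length
  (PySem.List.pyRange 0 n 1).flatMap (fun x =>
    (PySem.List.pyRange 0 m 1).map (fun y =>
      (x, y, pvDirs.map (fun d => pvSight n m x y d.1 d.2))))

-- ===== PRECONDITION & SPEC =====
-- A evaluates grid[0]; on the empty grid it raises IndexError, hence the exclusion.
def Pre_create_adjacent_coo_sight (grid : List (List String)) : Prop := grid ≠ []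
instance (grid : List (List String)) : Decidable (Pre_create_adjacent_coo_sight grid) := by unfold Pre_create_adjacent_coo_sight; infer_instance

def pvWitness_create_adjacent_coo_sight : List (List String) := [["L", "."], [".", "L"]]

def Spec_create_adjacent_coo_sight (grid : List (List String)) (out : List (Int × Int × (List (List (Int × Int))))) : Prop := out = create_adjacent_coo_sight_alt grid
instance (grid : List (List String)) (out : List (Int × Int × (List (List (Int × Int))))) : Decidable (Spec_create_adjacent_coo_sight grid out) := by unfold Spec_create_adjacent_coo_sight; infer_instance

-- ===== CLAIM (what is proved, stated in full; the proofs are below) =====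
def Claim_equal_create_adjacent_coo_sight : Prop := ∀ (grid : List (List String)), Dom_create_adjacent_coo_sight grid → Pre_create_adjacent_coo_sight grid → Spec_create_adjacent_coo_sight grid (create_adjacent_coo_sight grid)

-- ===== LEMMAS AND PROOFS =====

-- The while-loop, started one step out from (x, y), produces exactly k points when the first k
-- steps are in bounds and step k+1 is not.
theorem pvGcsLoop_eq_map (dx dy : Int) (k : Nat) :
    ∀ (fuel : Nat) (n m x y : Int), k < fuel →
    (∀ i : Nat, 1 ≤ i → i ≤ k →
      0 ≤ x + i * dx ∧ x + i * dx < n ∧ 0 ≤ y + i * dy ∧ y + i * dy < m) →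
    ¬(0 ≤ x + (k + 1 : Nat) * dx ∧ x + (k + 1 : Nat) * dx < n ∧
      0 ≤ y + (k + 1 : Nat) * dy ∧ y + (k + 1 : Nat) * dy < m) →
    pvGcsLoop fuel n m (x + dx) (y + dy) dx dy
      = (List.range k).map (fun i => (x + (i + 1 : Nat) * dx, y + (i + 1 : Nat) * dy)) := by
  induction k with
  | zero =>
    intro fuel n m x y hfuel _ hout
    match fuel, hfuel with
    | f + 1, _ =>
      unfold pvGcsLoop
      rw [if_neg]
      · simp
      · intro h
        apply hout
        push_cast
        constructor
        · linarith [h.1]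
        constructor
        · linarith [h.2.1]
        constructor
        · linarith [h.2.2.1]
        · linarith [h.2.2.2]
  | succ k ih =>
    intro fuel n m x y hfuel hin hout
    match fuel, hfuel with
    | f + 1, hfuel =>
      have hcond : 0 ≤ x + dx ∧ x + dx < n ∧ 0 ≤ y + dy ∧ y + dy < m := by
        have := hin 1 le_rfl (by omega)
        push_cast at this
        refine ⟨by linarith [this.1], by linarith [this.2.1],
          by linarith [this.2.2.1], by linarith [this.2.2.2]⟩
      unfold pvGcsLoop
      rw [if_pos hcond]
      have hrec := ih f n m (x + dx) (y + dy) (by omega)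
        (by
          intro i h1 h2
          have := hin (i + 1) (by omega) (by omega)
          push_cast at this ⊢
          refine ⟨by linarith [this.1], by linarith [this.2.1],
            by linarith [this.2.2.1], by linarith [this.2.2.2]⟩)
        (by
          intro h
          apply hout
          push_cast at h ⊢
          refine ⟨by linarith [h.1], by linarith [h.2.1],
            by linarith [h.2.2.1], by linarith [h.2.2.2]⟩)
      rw [hrec, List.range_succ_eq_map, List.map_cons, List.map_map]
      congr 1
      · push_cast
        simp only [Prod.mk.injEq]
        constructor <;> ring
      · apply List.map_congr_left
        intro i _
        simp only [Function.comp]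
        push_cast
        simp only [Prod.mk.injEq]
        constructor <;> ring

-- closed form of B's per-direction list
theorem pvSight_eq_map (n m x y dx dy : Int) (k : Int) (hk : 0 ≤ k)
    (hkval : (match (if dx < 0 then some x else if dx > 0 then some (n - 1 - x) else none),
                    (if dy < 0 then some y else if dy > 0 then some (m - 1 - y) else none) with
              | none, b? => b?.getD 0
              | some a, none => a
              | some a, some b => min a b) = k) :
    pvSight n m x y dx dy
      = (List.range k.toNat).map (fun i => (x + (i + 1 : Nat) * dx, y + (i + 1 : Nat) * dy)) := by
  unfold pvSight
  simp only [hkval]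
  rw [PySem.List.pyRange_one]
  rw [List.map_map]
  have : (k + 1 - 1).toNat = k.toNat := by omega
  rw [this]
  apply List.map_congr_left
  intro i _
  simp only [Function.comp]
  push_cast
  ring_nf

-- loop = closed form, for each of the 8 directions, at an in-bounds cell
theorem get_coo_eq_pvSight (n m x y dx dy : Int)
    (hx : 0 ≤ x) (hxn : x < n) (hy : 0 ≤ y) (hym : y < m)
    (hdx : dx = -1 ∨ dx = 0 ∨ dx = 1) (hdy : dy = -1 ∨ dy = 0 ∨ dy = 1)
    (hne : ¬(dx = 0 ∧ dy = 0)) :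
    get_coo_in_sight n m x dx y dy = pvSight n m x y dx dy := by
  -- the closed-form step count
  set k : Int :=
    (match (if dx < 0 then some x else if dx > 0 then some (n - 1 - x) else none),
           (if dy < 0 then some y else if dy > 0 then some (m - 1 - y) else none) with
     | none, b? => b?.getD 0
     | some a, none => a
     | some a, some b => min a b) with hkdef
  have hk : 0 ≤ k := by
    rcases hdx with h1 | h1 | h1 <;> rcases hdy with h2 | h2 | h2 <;>
      simp [hkdef, h1, h2] <;> omega
  rw [pvSight_eq_map n m x y dx dy k hk hkdef.symm]
  unfold get_coo_in_sight
  apply pvGcsLoop_eq_map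
  · rcases hdx with h1 | h1 | h1 <;> rcases hdy with h2 | h2 | h2 <;>
      simp [hkdef, h1, h2] <;> omega
  · intro i h1 h2
    have hik : (i : Int) ≤ k := by omega
    rcases hdx with h3 | h3 | h3 <;> rcases hdy with h4 | h4 | h4 <;>
      simp [hkdef, h3, h4] at hik ⊢ <;> omega
  · intro h
    have : ((k.toNat + 1 : Nat) : Int) = k + 1 := by omega
    rw [this] at h
    rcases hdx with h3 | h3 | h3 <;> rcases hdy with h4 | h4 | h4 <;>
      simp [hkdef, h3, h4] at h ⊢ <;> omega

theorem cell_eq (n m x y : Int) (hx : 0 ≤ x) (hxn : x < n) (hy : 0 ≤ y) (hym : y < m) :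
    [get_coo_in_sight n m x (-1) y (-1),
     get_coo_in_sight n m x (-1) y 0,
     get_coo_in_sight n m x (-1) y 1,
     get_coo_in_sight n m x 0 y (-1),
     get_coo_in_sight n m x 0 y 1,
     get_coo_in_sight n m x 1 y (-1),
     get_coo_in_sight n m x 1 y 0,
     get_coo_in_sight n m x 1 y 1]
    = pvDirs.map (fun d => pvSight n m x y d.1 d.2) := by
  simp only [pvDirs, List.map_cons, List.map_nil, List.cons.injEq, and_true]
  refine ⟨?_, ?_, ?_, ?_, ?_, ?_, ?_, ?_⟩ <;>
    exact get_coo_eq_pvSight n m x y _ _ hx hxn hy hym (by norm_num) (by norm_num) (by norm_num)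

-- ===== VERDICT (by name: the statement is the Claim_ definition above) =====
theorem create_adjacent_coo_sight_spec : Claim_equal_create_adjacent_coo_sight := by
  intro grid _ hpre
  unfold Spec_create_adjacent_coo_sight create_adjacent_coo_sight create_adjacent_coo_sight_alt
  simp only [PySem.List.foldl_append_singleton_eq_map, PySem.List.foldl_append_eq_flatMap,
    List.nil_append]
  rw [List.flatMap_def, List.flatMap_def]
  apply congrArg List.flatten
  apply List.map_congr_left
  intro x hx
  apply List.map_congr_left
  intro y hy
  rw [PySem.List.mem_pyRange_one] at hx hy
  simp only [Prod.mk.injEq, true_and]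
  exact cell_eq _ _ x y hx.1 hx.2 hy.1 hy.2
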